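-- pv_equiv track=rewrite | github.com/sdrakulich/fork-verifiers | environments/vf_docpair_task/checkers.py | check_procedure
-- ===== SOURCE A (Python) =====
-- from typing import Dict, Any, List
--
-- def check_procedure(response: str, task: Dict[str, Any]) -> bool:
--     steps: List[Dict[str, str]] = task.get("policy_steps", [])
--     resp_lower = response.lower()
--     position = 0
--     for step in steps:
--         must = step.get("must", "").lower()
--         if not must:
--             continue
--         idx = resp_lower.find(must, position)
--         if idx < 0:
--             return False
--         position = idx + len(must)
--     return True
-- ===== SOURCE B (Python) =====
-- def check_procedure(response: str, task: dict) -> bool: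
--     steps = task.get("policy_steps", [])
--     musts = [m for m in (step.get("must", "").lower() for step in steps) if m]
--     resp = response.lower()
--     end = len(resp)
--     for m in reversed(musts):
--         idx = resp.rfind(m, 0, end)
--         if idx < 0:
--             return False
--         end = idx
--     return True
-- ===== Notes on version B (the rewrite author's own statement) =====
-- stated objective: alternative
-- what changed: B matches the required substrings back-to-front with a latest-match greedy (str.rfind under a shrinking end bound) instead of A's forward earliest-match cursor; both decide existence of ordered non-overlapping occurrences, proved by an exchange argument.
import Mathlib
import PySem

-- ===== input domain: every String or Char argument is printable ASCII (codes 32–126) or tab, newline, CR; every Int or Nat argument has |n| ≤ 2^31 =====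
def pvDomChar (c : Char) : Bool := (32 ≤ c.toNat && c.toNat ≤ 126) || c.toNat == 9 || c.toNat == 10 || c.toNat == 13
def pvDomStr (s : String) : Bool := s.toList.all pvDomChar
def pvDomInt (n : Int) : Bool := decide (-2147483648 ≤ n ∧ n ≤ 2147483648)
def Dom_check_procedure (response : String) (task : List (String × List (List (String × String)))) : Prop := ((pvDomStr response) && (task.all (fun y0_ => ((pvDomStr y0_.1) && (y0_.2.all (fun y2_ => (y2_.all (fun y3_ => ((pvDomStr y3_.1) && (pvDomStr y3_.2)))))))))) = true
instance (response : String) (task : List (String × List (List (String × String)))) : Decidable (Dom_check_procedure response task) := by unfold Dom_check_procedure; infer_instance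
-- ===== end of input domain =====

-- B matches the required substrings back-to-front (latest occurrence under a shrinking end
-- bound, via rfind) instead of A's forward earliest-match cursor; same cost, different algorithm.

-- ===== PORT A =====
-- A's for-loop over steps with its running 'position' offset and forward find
def pvGoA (resp : List Char) (pos : Int) : List (List (String × String)) → Bool
  | [] => true
  | step :: rest =>
    let must := PySem.Chars.lower (PySem.Dict.getD (PySem.Dict.mk step) "must" "").toList
    if must = [] then pvGoA resp pos rest
    else
      let idx := PySem.Chars.findFrom resp must pos
      if idx < 0 then false
      else pvGoA resp (idx + (must.length : Int)) rest

def check_procedure (response : String) (task : List (String × List (List (String × String)))) : Bool :=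
  let steps := PySem.Dict.getD (PySem.Dict.mk task) "policy_steps" []
  pvGoA (PySem.Str.lower response).toList 0 steps

-- ===== PORT B =====
-- the list comprehension: non-empty lowercased musts
def pvMusts (steps : List (List (String × String))) : List (List Char) :=
  (steps.map (fun step => PySem.Chars.lower (PySem.Dict.getD (PySem.Dict.mk step) "must" "").toList)).filter
    (fun m => !(m = []))

-- B's for-loop over reversed(musts), carrying the shrinking end bound into resp.rfind(m, 0, end)
def pvGoB (resp : List Char) (endPos : Int) : List (List Char) → Bool
  | [] => true
  | m :: rest =>
    let idx := PySem.Chars.rfindFrom resp m 0 (some endPos)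
    if idx < 0 then false
    else pvGoB resp idx rest

def check_procedure_alt (response : String) (task : List (String × List (List (String × String)))) : Bool :=
  let steps := PySem.Dict.getD (PySem.Dict.mk task) "policy_steps" []
  let musts := pvMusts steps
  let resp := (PySem.Str.lower response).toList
  pvGoB resp (resp.length : Int) musts.reverse

-- ===== PRECONDITION & SPEC =====
def Spec_check_procedure (response : String) (task : List (String × List (List (String × String)))) (out : Bool) : Prop := out = check_procedure_alt response task
instance (response : String) (task : List (String × List (List (String × String)))) (out : Bool) : Decidable (Spec_check_procedure response task out) := by unfold Spec_check_procedure; infer_instance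

-- ===== CLAIM (what is proved, stated in full; the proofs are below) =====
def Claim_equal_check_procedure : Prop := ∀ (response : String) (task : List (String × List (List (String × String)))), Dom_check_procedure response task → Spec_check_procedure response task (check_procedure response task)

-- ===== LEMMAS AND PROOFS =====

-- ordered non-overlapping occurrences of the musts within resp[lo:hi]
def pvMatch (resp : List Char) (lo hi : Nat) : List (List Char) → Prop
  | [] => True
  | m :: ms => ∃ j, lo ≤ j ∧ j + m.length ≤ hi ∧ m <+: resp.drop j ∧ pvMatch resp (j + m.length) hi ms

lemma pvMatch_mono_lo {resp : List Char} {lo lo' hi : Nat} {ms : List (List Char)}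
    (h : lo' ≤ lo) (hm : pvMatch resp lo hi ms) : pvMatch resp lo' hi ms := by
  cases ms with
  | nil => trivial
  | cons m ms =>
    obtain ⟨j, h1, h2, h3, h4⟩ := hm
    exact ⟨j, le_trans h h1, h2, h3, h4⟩

lemma pvMatch_mono_hi {resp : List Char} {lo hi hi' : Nat} {ms : List (List Char)}
    (h : hi ≤ hi') (hm : pvMatch resp lo hi ms) : pvMatch resp lo hi' ms := by
  induction ms generalizing lo with
  | nil => trivial
  | cons m ms ih =>
    obtain ⟨j, h1, h2, h3, h4⟩ := hm
    exact ⟨j, h1, le_trans h2 h, h3, ih h4⟩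

lemma pvMatch_append {resp : List Char} {lo hi : Nat} {xs ys : List (List Char)}
    (hlohi : lo ≤ hi) :
    pvMatch resp lo hi (xs ++ ys) ↔
      ∃ mid, lo ≤ mid ∧ mid ≤ hi ∧ pvMatch resp lo mid xs ∧ pvMatch resp mid hi ys := by
  induction xs generalizing lo with
  | nil =>
    simp only [List.nil_append]
    constructor
    · intro h; exact ⟨lo, le_refl _, hlohi, trivial, h⟩
    · rintro ⟨mid, h1, _, _, h4⟩; exact pvMatch_mono_lo h1 h4
  | cons m xs ih =>
    constructor
    · rintro ⟨j, h1, h2, h3, h4⟩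
      obtain ⟨mid, g1, g2, g3, g4⟩ := (ih h2).mp h4
      exact ⟨mid, le_trans (le_trans h1 (Nat.le_add_right _ _)) g1, g2, ⟨j, h1, g1, h3, g3⟩, g4⟩
    · rintro ⟨mid, h1, h2, ⟨j, g1, g2, g3, g4⟩, h5⟩
      refine ⟨j, g1, le_trans g2 h2, g3, ?_⟩
      exact (ih (le_trans g2 h2)).mpr ⟨mid, g2, h2, g4, h5⟩

-- occurrence in absolute coordinates: drop of drop
lemma pvDrop_drop (resp : List Char) (k i : Nat) :
    (resp.drop k).drop i = resp.drop (k + i) := by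
  rw [List.drop_drop]

-- forward greedy (A's loop) decides pvMatch on [k, resp.length]
lemma pvGoA_iff (resp : List Char) (steps : List (List (String × String))) (k : Nat)
    (hk : k ≤ resp.length) :
    pvGoA resp (k : Int) steps = true ↔ pvMatch resp k resp.length (pvMusts steps) := by
  induction steps generalizing k with
  | nil => simp [pvGoA, pvMusts, pvMatch]
  | cons step rest ih =>
    simp only [pvGoA]
    by_cases hm : PySem.Chars.lower (PySem.Dict.getD (PySem.Dict.mk step) "must" "").toList = []
    · have hfil : pvMusts (step :: rest) = pvMusts rest := by
        simp [pvMusts, hm]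
      rw [hfil, if_pos hm]; exact ih k hk
    · set must := PySem.Chars.lower (PySem.Dict.getD (PySem.Dict.mk step) "must" "").toList with hmust
      have hlen1 : 1 ≤ must.length := by
        cases h : must with
        | nil => exact absurd h hm
        | cons a l => simp
      have hfil : pvMusts (step :: rest) = must :: pvMusts rest := by
        simp only [pvMusts, List.map_cons, List.filter_cons, ← hmust]
        simp [hm]
      rw [hfil, if_neg hm]
      rw [PySem.Chars.findFrom_natCast resp must k hk]
      by_cases hneg : PySem.Chars.find (List.drop k resp) must = -1
      · rw [hneg]
        have hno : ¬ must <:+: resp.drop k := (PySem.Chars.find_eq_neg_one_iff _ _).mp hneg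
        
        constructor
        · intro h; exact absurd h (by simp)
        · rintro ⟨j, h1, h2, h3, _⟩
          exfalso
          apply hno
          have : must <+: (resp.drop k).drop (j - k) := by
            rw [pvDrop_drop]
            have : k + (j - k) = j := by omega
            rw [this]; exact h3
          have := (PySem.Chars.exists_prefix_drop_iff_isIn _ _).mp ⟨j - k, this⟩
          exact (PySem.Chars.isIn_iff_infix _ _).mp this
      · have hj0 : 0 ≤ PySem.Chars.find (List.drop k resp) must := by
          have := PySem.Chars.neg_one_le_find (List.drop k resp) must
          omega
        set fidx := PySem.Chars.find (List.drop k resp) must with hfidx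
        obtain ⟨hocc, hmin⟩ := PySem.Chars.find_spec (s := List.drop k resp) (sub := must) hj0
        have hoccabs : must <+: resp.drop (k + fidx.toNat) := by
          rw [← pvDrop_drop]; exact hocc
        have hfle : fidx ≤ (resp.drop k).length := PySem.Chars.find_le_length _ _
        have hfle' : k + fidx.toNat ≤ resp.length := by
          simp only [List.length_drop] at hfle; omega
        have hfit : k + fidx.toNat + must.length ≤ resp.length := by
          have := hoccabs.length_le
          simp only [List.length_drop] at this
          omega
        rw [if_neg hneg]
        rw [if_neg (show ¬ ((k : Int) + fidx < 0) by omega)]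
        have hcast : (k : Int) + fidx + (must.length : Int)
            = ((k + fidx.toNat + must.length : Nat) : Int) := by omega
        rw [hcast, ih (k + fidx.toNat + must.length) (by omega)]
        constructor
        · intro h
          exact ⟨k + fidx.toNat, by omega, hfit, hoccabs, h⟩
        · rintro ⟨j, h1, h2, h3, h4⟩
          have hjge : k + fidx.toNat ≤ j := by
            by_contra hlt
            rw [Nat.not_le] at hlt
            apply hmin (j - k) (by omega)
            rw [pvDrop_drop]
            have : k + (j - k) = j := by omega
            rw [this]; exact h3
          exact pvMatch_mono_lo (by omega) h4

-- rfind.go finds the HIGHEST occurrence index ≤ j, or -1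
lemma pvRfind_go_spec (s sub : List Char) (j : Nat) :
    (PySem.Chars.rfind.go s sub j = -1 ∧ ∀ i, i ≤ j → ¬ sub <+: s.drop i) ∨
    (∃ idx : Nat, PySem.Chars.rfind.go s sub j = (idx : Int) ∧ idx ≤ j ∧ sub <+: s.drop idx ∧
      ∀ i, idx < i → i ≤ j → ¬ sub <+: s.drop i) := by
  induction j with
  | zero =>
    by_cases h : sub.isPrefixOf s
    · right
      refine ⟨0, ?_, le_refl _, ?_, ?_⟩
      · simp [PySem.Chars.rfind.go, h]
      · simpa using List.isPrefixOf_iff_prefix.mp h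
      · intro i h1 h2 _; omega
    · left
      constructor
      · simp [PySem.Chars.rfind.go, h]
      · intro i hi hpre
        have : i = 0 := by omega
        subst this
        exact h (List.isPrefixOf_iff_prefix.mpr (by simpa using hpre))
  | succ n ih =>
    by_cases h : sub.isPrefixOf (s.drop (n + 1))
    · right
      refine ⟨n + 1, ?_, le_refl _, List.isPrefixOf_iff_prefix.mp h, ?_⟩
      · simp [PySem.Chars.rfind.go, h]
      · intro i h1 h2 _; omega
    · have hgo : PySem.Chars.rfind.go s sub (n + 1) = PySem.Chars.rfind.go s sub n := by
        simp [PySem.Chars.rfind.go, h]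
      have hnot : ¬ sub <+: s.drop (n + 1) := fun hp => h (List.isPrefixOf_iff_prefix.mpr hp)
      rcases ih with ⟨h1, h2⟩ | ⟨idx, h1, h2, h3, h4⟩
      · left
        refine ⟨hgo.trans h1, ?_⟩
        intro i hi
        rcases Nat.lt_or_ge i (n + 1) with hlt | hge
        · exact h2 i (by omega)
        · have : i = n + 1 := by omega
          subst this; exact hnot
      · right
        refine ⟨idx, hgo.trans h1, by omega, h3, ?_⟩
        intro i hi1 hi2
        rcases Nat.lt_or_ge i (n + 1) with hlt | hge
        · exact h4 i hi1 (by omega)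
        · have : i = n + 1 := by omega
          subst this; exact hnot

-- resp.rfind(m, 0, hi) = rfind of m in resp[:hi]
lemma pvRfindFrom_zero (resp m : List Char) (hi : Nat) (h : hi ≤ resp.length) :
    PySem.Chars.rfindFrom resp m 0 (some (hi : Int)) = PySem.Chars.rfind (resp.take hi) m := by
  simp only [PySem.Chars.rfindFrom]
  rw [if_neg (by omega : ¬ ((resp.length : Int) < (hi : Int)))]
  rw [if_neg (by omega : ¬ ((hi : Int) < 0))]
  rw [if_neg (by omega : ¬ ((0 : Int) < 0))]
  rw [if_neg (by omega : ¬ ((hi : Int) < 0))]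
  simp only [Int.toNat_natCast, Int.toNat_zero, List.drop_zero]
  split
  · next heq => rw [heq]
  · next => omega

-- occurrence inside resp[:hi] ↔ occurrence in resp fitting before hi (for non-empty m)
lemma pvOcc_take (resp m : List Char) (hi i : Nat) (hm : m ≠ []) :
    m <+: (resp.take hi).drop i ↔ m <+: resp.drop i ∧ i + m.length ≤ hi := by
  have hlen1 : 1 ≤ m.length := by
    cases h : m with
    | nil => exact absurd h hm
    | cons a l => simp
  rw [List.drop_take, List.prefix_take_iff]
  constructor
  · rintro ⟨h1, h2⟩; exact ⟨h1, by omega⟩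
  · rintro ⟨h1, h2⟩; exact ⟨h1, by omega⟩

-- backward greedy (B's loop over the reversed musts) decides pvMatch on [0, hi]
lemma pvGoB_iff (resp : List Char) (l : List (List Char)) (hi : Nat)
    (hhi : hi ≤ resp.length) (hne : ∀ m ∈ l, m ≠ []) :
    pvGoB resp (hi : Int) l = true ↔ pvMatch resp 0 hi l.reverse := by
  induction l generalizing hi with
  | nil => simp [pvGoB, pvMatch]
  | cons m rest ih =>
    have hm : m ≠ [] := hne m (by simp)
    have hne' : ∀ x ∈ rest, x ≠ [] := fun x hx => hne x (by simp [hx])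
    have hlen1 : 1 ≤ m.length := by
      cases h : m with
      | nil => exact absurd h hm
      | cons a l => simp
    simp only [pvGoB]
    rw [pvRfindFrom_zero resp m hi hhi]
    have hrw : PySem.Chars.rfind (resp.take hi) m
        = PySem.Chars.rfind.go (resp.take hi) m hi := by
      simp only [PySem.Chars.rfind, List.length_take]
      congr 1
      omega
    rw [hrw]
    have happ := pvMatch_append (resp := resp) (lo := 0) (hi := hi)
      (xs := rest.reverse) (ys := [m]) (Nat.zero_le _)
    rcases pvRfind_go_spec (resp.take hi) m hi with ⟨h1, h2⟩ | ⟨idx, h1, h2, h3, h4⟩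
    · rw [h1]
      rw [if_pos (by norm_num : (-1 : Int) < 0)]
      simp only [List.reverse_cons]
      constructor
      · intro h; exact absurd h (by simp)
      · intro h
        exfalso
        obtain ⟨mid, _, _, _, ⟨j, g1, g2, g3, _⟩⟩ := happ.mp h
        exact h2 j (by omega) ((pvOcc_take resp m hi j hm).mpr ⟨g3, g2⟩)
    · obtain ⟨hocc, hfit⟩ := (pvOcc_take resp m hi idx hm).mp h3
      rw [h1, if_neg (by omega : ¬ ((idx : Int) < 0))]
      rw [ih idx (by omega) hne']
      simp only [List.reverse_cons]
      rw [happ]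
      constructor
      · intro h
        exact ⟨idx, Nat.zero_le _, by omega, h, ⟨idx, le_refl _, hfit, hocc, trivial⟩⟩
      · rintro ⟨mid, _, _, hrest, ⟨j, g1, g2, g3, _⟩⟩
        have hjle : j ≤ idx := by
          by_contra hlt
          rw [Nat.not_le] at hlt
          exact h4 j hlt (by omega) ((pvOcc_take resp m hi j hm).mpr ⟨g3, g2⟩)
        exact pvMatch_mono_hi (by omega) (pvMatch_mono_lo (Nat.zero_le _) hrest)

-- ===== VERDICT (by name: the statement is the Claim_ definition above) =====
theorem check_procedure_spec : Claim_equal_check_procedure := by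
  intro response task _
  unfold Spec_check_procedure check_procedure check_procedure_alt
  set resp := (PySem.Str.lower response).toList with hresp
  set steps := PySem.Dict.getD (PySem.Dict.mk task) "policy_steps" [] with hsteps
  have hA := pvGoA_iff resp steps 0 (Nat.zero_le _)
  have hne : ∀ m ∈ (pvMusts steps).reverse, m ≠ [] := by
    intro m hmem
    rw [List.mem_reverse] at hmem
    have := List.of_mem_filter hmem
    simpa using this
  have hB := pvGoB_iff resp ((pvMusts steps).reverse) resp.length (le_refl _) hne
  rw [List.reverse_reverse] at hB
  have : pvGoA resp (0 : Int) steps = pvGoB resp (resp.length : Int) (pvMusts steps).reverse := by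
    rw [Bool.eq_iff_iff]
    rw [show ((0 : Nat) : Int) = (0 : Int) from rfl] at hA
    exact hA.trans hB.symm
  simpa using this
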